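-- pv_equiv track=rewrite | github.com/Edwardius/NLP_Assignments | XCS224N-Word_Embeddings/src-co_occurrence/submission.py | distinct_words
-- ===== SOURCE A (Python) =====
-- def distinct_words(corpus):
--     """ Determine a list of distinct words for the corpus.
--         Params:
--             corpus (list of list of strings): corpus of documents
--         Return:
--             corpus_words (list of strings): list of distinct words across the corpus, sorted (using python 'sorted' function)
--             num_corpus_words (integer): number of distinct words across the corpus
--     """
--
--     # ### START CODE HERE ###
--
--     num_corpus_words = 0
--     # waiting to be sorted after the fact
--     unsorted_corpus_words = []
--
--     # finds all of the distinct words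
--     for phrase in corpus:
--         for word in phrase:
--             distinct = True
--
--             # checks if word is already in the unsorted_corpus_words
--             for comparison in unsorted_corpus_words:
--                 if word == comparison:
--                     distinct = False
--                     break
--
--             if distinct:
--                 unsorted_corpus_words.append(word)
--                 num_corpus_words += 1
--
--     # sort words into alphabetical order
--     corpus_words = sorted(unsorted_corpus_words)
--
--     # ### END CODE HERE ###
--
--     return corpus_words, num_corpus_words
-- ===== SOURCE B (Python) =====
-- def distinct_words(corpus):
--     flat = []
--     for phrase in corpus:
--         flat.extend(phrase)
--     srt = sorted(flat)
--     corpus_words = []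
--     for w in srt:
--         if not corpus_words or corpus_words[-1] != w:
--             corpus_words.append(w)
--     return corpus_words, len(corpus_words)
-- ===== Notes on version B (the rewrite author's own statement) =====
-- stated objective: faster
-- what changed: Replaces the quadratic linear-membership-scan dedup with flatten once, one global sort, and a single linear adjacent-dedup pass (no set/dict membership).
import Mathlib
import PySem

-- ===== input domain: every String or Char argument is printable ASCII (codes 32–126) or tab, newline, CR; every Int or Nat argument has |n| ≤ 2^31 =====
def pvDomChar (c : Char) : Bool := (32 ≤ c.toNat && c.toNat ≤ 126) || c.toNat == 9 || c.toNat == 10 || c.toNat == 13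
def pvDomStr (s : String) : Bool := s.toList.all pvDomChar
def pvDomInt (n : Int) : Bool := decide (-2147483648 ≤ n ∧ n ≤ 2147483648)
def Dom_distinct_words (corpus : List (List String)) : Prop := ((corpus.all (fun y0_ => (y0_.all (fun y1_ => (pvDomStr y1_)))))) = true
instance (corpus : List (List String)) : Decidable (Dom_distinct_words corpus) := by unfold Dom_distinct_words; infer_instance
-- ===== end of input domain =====

-- B replaces A's quadratic membership-scan dedup by flatten + one sort + a linear adjacent-dedup pass.

-- ===== PORT A =====
-- the inner 'for comparison in unsorted_corpus_words: if word == comparison: distinct = False; break' loop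
def pvScanDistinct (word : String) : List String → Bool
  | [] => true
  | c :: rest => if word = c then false else pvScanDistinct word rest

-- one 'for word in phrase' step over the state (num_corpus_words, unsorted_corpus_words)
def pvStepA (st : Int × List String) (word : String) : Int × List String :=
  if pvScanDistinct word st.2 then (st.1 + 1, st.2 ++ [word]) else st

def distinct_words (corpus : List (List String)) : List String × Int :=
  let st := corpus.foldl (fun st phrase => phrase.foldl pvStepA st) (0, [])
  (PySem.List.sorted st.2 (fun x => x) false, st.1)

-- ===== PORT B =====
-- 'if not corpus_words or corpus_words[-1] != w: corpus_words.append(w)'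
def pvStepB (acc : List String) (w : String) : List String :=
  if acc = [] ∨ acc.getLast? ≠ some w then acc ++ [w] else acc

def distinct_words_alt (corpus : List (List String)) : List String × Int :=
  let flat := corpus.foldl (fun acc phrase => acc ++ phrase) []
  let srt := PySem.List.sorted flat (fun x => x) false
  let corpus_words := srt.foldl pvStepB []
  (corpus_words, (corpus_words.length : Int))

-- ===== PRECONDITION & SPEC =====
def Spec_distinct_words (corpus : List (List String)) (out : List String × Int) : Prop := out = distinct_words_alt corpus
instance (corpus : List (List String)) (out : List String × Int) : Decidable (Spec_distinct_words corpus out) := by unfold Spec_distinct_words; infer_instance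

-- ===== CLAIM (what is proved, stated in full; the proofs are below) =====
def Claim_equal_distinct_words : Prop := ∀ (corpus : List (List String)), Dom_distinct_words corpus → Spec_distinct_words corpus (distinct_words corpus)

-- ===== LEMMAS AND PROOFS =====

-- A's inner scan loop is a membership test
lemma pvScanDistinct_eq (w : String) (ys : List String) : pvScanDistinct w ys = !ys.contains w := by
  induction ys with
  | nil => rfl
  | cons c rest ih =>
      by_cases h : w = c
      · simp [pvScanDistinct, h]
      · simp [pvScanDistinct, h, ih]

-- A's step is PySem.Set.add with a running length
lemma foldl_stepA_eq (flat : List String) : ∀ acc : List String,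
    flat.foldl pvStepA ((acc.length : Int), acc)
      = (((flat.foldl PySem.Set.add acc).length : Int), flat.foldl PySem.Set.add acc) := by
  induction flat with
  | nil => intro acc; rfl
  | cons w rest ih =>
      intro acc
      simp only [List.foldl_cons]
      by_cases h : w ∈ acc
      · have h1 : pvStepA ((acc.length : Int), acc) w = ((acc.length : Int), acc) := by
          simp [pvStepA, pvScanDistinct_eq, h]
        have h2 : PySem.Set.add acc w = acc := by
          simp [PySem.Set.add, PySem.Set.contains, h]
        rw [h1, h2, ih]
      · have h1 : pvStepA ((acc.length : Int), acc) w = (((acc ++ [w]).length : Int), acc ++ [w]) := by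
          simp [pvStepA, pvScanDistinct_eq, h]
        have h2 : PySem.Set.add acc w = acc ++ [w] := by
          simp [PySem.Set.add, PySem.Set.contains, h]
        rw [h1, h2, ih]

-- every element of a strictly increasing list is ≤ its last element
lemma le_getLast_of_pairwise_lt {acc : List String} (hp : acc.Pairwise (· < ·))
    {a l : String} (ha : a ∈ acc) (hl : acc.getLast? = some l) : a ≤ l := by
  induction acc with
  | nil => cases ha
  | cons x rest ih =>
      cases rest with
      | nil =>
          simp at ha hl; simp [ha, hl]
      | cons y t =>
          rw [List.getLast?_cons_cons] at hl
          rcases List.mem_cons.mp ha with rfl | ha'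
          · have hy : a < l := by
              have := List.pairwise_cons.mp hp
              exact this.1 l (List.mem_of_getLast? hl)
            exact le_of_lt hy
          · exact ih (List.pairwise_cons.mp hp).2 ha' hl

-- B's adjacent-dedup loop on a ≤-sorted input: invariant over the accumulator
lemma foldl_stepB_spec (s : List String) : ∀ acc : List String,
    s.Pairwise (· ≤ ·) → acc.Pairwise (· < ·) →
    (∀ a ∈ acc, ∀ x ∈ s, a ≤ x) →
    (s.foldl pvStepB acc).Pairwise (· < ·) ∧
      (∀ y, y ∈ s.foldl pvStepB acc ↔ y ∈ acc ∨ y ∈ s) := by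
  induction s with
  | nil => intro acc _ hacc _; simpa using hacc
  | cons w rest ih =>
      intro acc hs hacc hle
      have hs' := List.pairwise_cons.mp hs
      simp only [List.foldl_cons]
      by_cases hb : acc = [] ∨ acc.getLast? ≠ some w
      · have hstep : pvStepB acc w = acc ++ [w] := by simp [pvStepB, hb]
        rw [hstep]
        have hacc' : (acc ++ [w]).Pairwise (· < ·) := by
          rw [List.pairwise_append]
          refine ⟨hacc, List.pairwise_singleton _ _, ?_⟩
          intro a ha b hb'
          rw [List.mem_singleton] at hb'
          rw [hb']
          rcases hb with hnil | hlast
          · rw [hnil] at ha; cases ha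
          · have hne : acc ≠ [] := by intro h; subst h; cases ha
            obtain ⟨l, hl⟩ := List.getLast?_isSome.mpr hne |> Option.isSome_iff_exists.mp
            have hal : a ≤ l := le_getLast_of_pairwise_lt hacc ha hl
            have hlw : l ≤ w := hle l (List.mem_of_getLast? hl) w (List.mem_cons_self)
            have : l ≠ w := by intro h; exact hlast (h ▸ hl)
            exact lt_of_le_of_lt hal (lt_of_le_of_ne hlw this)
        have hle' : ∀ a ∈ acc ++ [w], ∀ x ∈ rest, a ≤ x := by
          intro a ha x hx
          rcases List.mem_append.mp ha with ha' | ha'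
          · exact hle a ha' x (List.mem_cons_of_mem _ hx)
          · simp at ha'; subst ha'; exact hs'.1 x hx
        obtain ⟨h1, h2⟩ := ih (acc ++ [w]) hs'.2 hacc' hle'
        refine ⟨h1, fun y => ?_⟩
        rw [h2 y]
        simp [or_assoc]
      · have hstep : pvStepB acc w = acc := by simp [pvStepB]; tauto
        rw [hstep]
        rw [not_or, not_ne_iff] at hb
        have hwacc : w ∈ acc := List.mem_of_getLast? hb.2
        have hle' : ∀ a ∈ acc, ∀ x ∈ rest, a ≤ x := by
          intro a ha x hx; exact hle a ha x (List.mem_cons_of_mem _ hx)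
        obtain ⟨h1, h2⟩ := ih acc hs'.2 hacc hle'
        refine ⟨h1, fun y => ?_⟩
        rw [h2 y]
        constructor
        · rintro (hy | hy)
          · exact Or.inl hy
          · exact Or.inr (List.mem_cons_of_mem _ hy)
        · rintro (hy | hy)
          · exact Or.inl hy
          · rcases List.mem_cons.mp hy with rfl | hy'
            · exact Or.inl hwacc
            · exact Or.inr hy'

-- accumulating with ++ builds the flatten
lemma foldl_append_eq_flatten (corpus : List (List String)) : ∀ acc : List String,
    corpus.foldl (fun acc phrase => acc ++ phrase) acc = acc ++ corpus.flatten := by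
  induction corpus with
  | nil => intro acc; simp
  | cons p rest ih => intro acc; simp [List.foldl_cons, ih, List.append_assoc]

-- the core identity: adjacent-dedup of sorted(flat) names sorted(set(flat))
lemma sorted_set_eq_dedupB (flat : List String) :
    PySem.List.sorted (PySem.Set.ofList flat) (fun x => x) false
      = (PySem.List.sorted flat (fun x => x) false).foldl pvStepB [] := by
  set s := PySem.List.sorted flat (fun x => x) false with hsdef
  have hs : s.Pairwise (· ≤ ·) := PySem.List.sorted_pairwise flat (fun x => x)
  obtain ⟨h1, h2⟩ := foldl_stepB_spec s [] hs (List.Pairwise.nil) (by simp)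
  apply PySem.List.sorted_eq_of_perm_of_pairwise_lt
  · rw [List.perm_ext_iff_of_nodup (h1.imp ne_of_lt) (PySem.Set.nodup_ofList flat)]
    intro y
    rw [h2 y]
    simp [PySem.Set.mem_ofList, hsdef, PySem.List.mem_sorted]
  · exact h1

-- ===== VERDICT (by name: the statement is the Claim_ definition above) =====
theorem distinct_words_spec : Claim_equal_distinct_words := by
  intro corpus _
  unfold Spec_distinct_words distinct_words distinct_words_alt
  have hflat := foldl_append_eq_flatten corpus []
  simp only [List.nil_append] at hflat
  have hA : corpus.foldl (fun st phrase => phrase.foldl pvStepA st) (0, ([] : List String))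
      = corpus.flatten.foldl pvStepA (0, []) := by
    rw [List.foldl_flatten]
  have h := foldl_stepA_eq corpus.flatten []
  simp only [List.length_nil, Int.natCast_zero] at h
  have hset : corpus.flatten.foldl PySem.Set.add [] = PySem.Set.ofList corpus.flatten := rfl
  have hcore := sorted_set_eq_dedupB corpus.flatten
  simp only [hflat, hA, h, hset, ← hcore]
  refine Prod.ext rfl ?_
  simp [PySem.List.length_sorted]
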